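-- pv_equiv track=rewrite | github.com/simonishah63/5790_Project | src/tool_runners/eacsl_runner.py | extract_instrumentation_details
-- ===== SOURCE A (Python) =====
-- def extract_instrumentation_details(output):
--     """Extract instrumentation details from output"""
--     details = {}
--     for line in output.splitlines():
--         if 'instrumented' in line.lower():
--             details['instrumentation_line'] = line.strip()
--         if 'assertion' in line.lower():
--             details['assertions_found'] = line.strip()
--     return details
-- ===== SOURCE B (Python) =====
-- def extract_instrumentation_details(output):
--     """Extract instrumentation details from output"""
--     lines = output.splitlines()
--     details = {}
--     for key, word in (('instrumentation_line', 'instrumented'),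
--                       ('assertions_found', 'assertion')):
--         matches = [line for line in lines if word in line.lower()]
--         if matches:
--             details[key] = matches[-1].strip()
--     return details
-- ===== Notes on version B (the rewrite author's own statement) =====
-- stated objective: alternative
-- what changed: B replaces A's line loop with dict overwrites by a keyword-table pass: for each (key, word) pair it filters the matching lines once and keeps the last match; Pre_ excludes outputs where an 'assertion' line precedes every 'instrumented' line while both keywords occur, because there A's dict insertion order (assertions_found first) is an accidental key order - the two results are still equal as Python dicts.
import Mathlib
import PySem

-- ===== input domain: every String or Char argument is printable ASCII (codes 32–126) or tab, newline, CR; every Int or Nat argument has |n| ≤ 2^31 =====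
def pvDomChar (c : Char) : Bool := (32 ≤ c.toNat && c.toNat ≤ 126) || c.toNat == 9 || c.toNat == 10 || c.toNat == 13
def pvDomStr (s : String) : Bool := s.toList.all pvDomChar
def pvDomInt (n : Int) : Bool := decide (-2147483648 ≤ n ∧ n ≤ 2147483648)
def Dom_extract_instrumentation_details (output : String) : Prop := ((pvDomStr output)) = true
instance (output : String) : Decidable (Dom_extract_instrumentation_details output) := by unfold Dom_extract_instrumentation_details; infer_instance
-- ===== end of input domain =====

-- B replaces A's dict-overwriting line loop by a keyword-table pass (filter per keyword,
-- keep the last match); objective: alternative decomposition. Return values agree as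
-- Python dicts everywhere; Pre_ excludes only inputs where A's dict KEY ORDER differs.

-- ===== PORT A =====
def extract_instrumentation_details (output : String) : List (String × String) :=
  (((PySem.Str.splitlines output).foldl (fun d line =>
      let d := if PySem.Str.isIn "instrumented" (PySem.Str.lower line)
               then d.insert "instrumentation_line" (PySem.Str.strip line) else d
      if PySem.Str.isIn "assertion" (PySem.Str.lower line)
      then d.insert "assertions_found" (PySem.Str.strip line) else d)
    (PySem.Dict.empty : PySem.Dict String String))).items

-- ===== PORT B =====
def extract_instrumentation_details_alt (output : String) : List (String × String) :=
  let lines := PySem.Str.splitlines output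
  ((([("instrumentation_line", "instrumented"), ("assertions_found", "assertion")] :
      List (String × String)).foldl (fun d kw =>
        let hits := lines.filter (fun line => PySem.Str.isIn kw.2 (PySem.Str.lower line))
        match hits.getLast? with
        | some m => d.insert kw.1 (PySem.Str.strip m)
        | none => d)
      (PySem.Dict.empty : PySem.Dict String String))).items

-- ===== PRECONDITION & SPEC =====
-- Pre_ excludes outputs in which a line containing 'assertion' precedes every line
-- containing 'instrumented' while both keywords occur: there A's dict lists
-- assertions_found first — an artefact of insertion order (the results are equal as
-- Python dicts) — while B always lists instrumentation_line first.
def Pre_extract_instrumentation_details (output : String) : Prop :=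
  (PySem.Str.splitlines output).findIdx (fun l => PySem.Str.isIn "instrumented" (PySem.Str.lower l))
      ≤ (PySem.Str.splitlines output).findIdx (fun l => PySem.Str.isIn "assertion" (PySem.Str.lower l))
  ∨ (PySem.Str.splitlines output).all (fun l => ! PySem.Str.isIn "instrumented" (PySem.Str.lower l)) = true
instance (output : String) : Decidable (Pre_extract_instrumentation_details output) := by unfold Pre_extract_instrumentation_details; infer_instance

def pvWitness_extract_instrumentation_details : String := "Instrumented: yes\nAssertions: 3"

def Spec_extract_instrumentation_details (output : String) (out : List (String × String)) : Prop := out = extract_instrumentation_details_alt output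
instance (output : String) (out : List (String × String)) : Decidable (Spec_extract_instrumentation_details output out) := by unfold Spec_extract_instrumentation_details; infer_instance

-- ===== CLAIM (what is proved, stated in full; the proofs are below) =====
def Claim_equal_extract_instrumentation_details : Prop := ∀ (output : String), Dom_extract_instrumentation_details output → Pre_extract_instrumentation_details output → Spec_extract_instrumentation_details output (extract_instrumentation_details output)

-- ===== LEMMAS AND PROOFS =====

-- abbreviations for the two keyword tests
def pvMI (l : String) : Bool := PySem.Str.isIn "instrumented" (PySem.Str.lower l)
def pvMA (l : String) : Bool := PySem.Str.isIn "assertion" (PySem.Str.lower l)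

-- abstract state: (last instrumented line, last assertion line, assertion key inserted first?)
def pvSt := Option String × Option String × Bool

def pvStep (st : pvSt) (l : String) : pvSt :=
  (if pvMI l then some (PySem.Str.strip l) else st.1,
   if pvMA l then some (PySem.Str.strip l) else st.2.1,
   st.2.2 || (st.1.isNone && st.2.1.isNone && pvMA l && !pvMI l))

def pvRenderItems (st : pvSt) : List (String × String) :=
  match st with
  | (none, none, _) => []
  | (none, some y, _) => [("assertions_found", y)]
  | (some x, none, _) => [("instrumentation_line", x)]
  | (some x, some y, b) =>
      if b then [("assertions_found", y), ("instrumentation_line", x)]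
      else [("instrumentation_line", x), ("assertions_found", y)]

def pvRenderD (st : pvSt) : PySem.Dict String String := PySem.Dict.mk (pvRenderItems st)

def pvStepA (d : PySem.Dict String String) (line : String) : PySem.Dict String String :=
  let d := if PySem.Str.isIn "instrumented" (PySem.Str.lower line)
           then d.insert "instrumentation_line" (PySem.Str.strip line) else d
  if PySem.Str.isIn "assertion" (PySem.Str.lower line)
  then d.insert "assertions_found" (PySem.Str.strip line) else d

def pvValid (st : pvSt) : Prop :=
  (st.2.2 = true → st.2.1.isSome) ∧ (st.1.isNone → st.2.1.isSome → st.2.2 = true)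

theorem pvValid_step (st : pvSt) (l : String) (h : pvValid st) : pvValid (pvStep st l) := by
  obtain ⟨oI, oA, b⟩ := st
  by_cases hA : pvMA l <;> by_cases hI : pvMI l <;>
    cases oI <;> cases oA <;> cases b <;>
    simp_all [pvValid, pvStep, hA, hI]

theorem pvStep_render (st : pvSt) (l : String) (h : pvValid st) :
    pvStepA (pvRenderD st) l = pvRenderD (pvStep st l) := by
  obtain ⟨oI, oA, b⟩ := st
  by_cases hI : pvMI l <;> by_cases hA : pvMA l <;>
    simp only [pvMI] at hI <;> simp only [pvMA] at hA <;>
    cases oI <;> cases oA <;> cases b <;>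
    first
      | (exfalso; simp [pvValid] at h; done)
      | (simp only [pvStepA, pvStep, pvMI, pvMA, hI, hA, if_true, if_false, Bool.false_or,
          Bool.true_or, Bool.or_true, Bool.and_true, Bool.and_false, Bool.or_false,
          Option.isNone_none, Option.isNone_some, Bool.true_and, Bool.false_and,
          Bool.not_true, Bool.not_false, Bool.false_eq_true, eq_self_iff_true]
         try simp [pvRenderD, pvRenderItems, PySem.Dict.insert, PySem.Dict.contains])

theorem pvFold_render (ls : List String) (st : pvSt) (h : pvValid st) :
    ls.foldl pvStepA (pvRenderD st) = pvRenderD (ls.foldl pvStep st) := by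
  induction ls generalizing st with
  | nil => rfl
  | cons l ls ih =>
      simp only [List.foldl_cons, pvStep_render st l h]
      exact ih _ (pvValid_step st l h)

theorem pvFold_fst (ls : List String) (st : pvSt) :
    (ls.foldl pvStep st).1 = (((ls.filter pvMI).map PySem.Str.strip).getLast?).or st.1 := by
  induction ls using List.reverseRecOn generalizing st with
  | nil => simp
  | append_singleton ls a ih =>
      by_cases h : pvMI a <;>
        simp [List.filter_append, h, pvStep, ih, Option.or]

theorem pvFold_snd (ls : List String) (st : pvSt) :
    (ls.foldl pvStep st).2.1 = (((ls.filter pvMA).map PySem.Str.strip).getLast?).or st.2.1 := by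
  induction ls using List.reverseRecOn generalizing st with
  | nil => simp
  | append_singleton ls a ih =>
      by_cases h : pvMA a <;>
        simp [List.filter_append, h, pvStep, ih, Option.or]

theorem pvFlag_of_some (ls : List String) (st : pvSt) (h : st.1.isSome) :
    (ls.foldl pvStep st).2.2 = st.2.2 := by
  induction ls generalizing st with
  | nil => rfl
  | cons l ls ih =>
      obtain ⟨oI, oA, b⟩ := st
      cases oI with
      | none => simp at h
      | some x =>
          simp only [List.foldl_cons]
          rw [ih]
          · simp [pvStep]
          · by_cases hI : pvMI l <;> simp [pvStep, hI]

-- if the fold raises the flag, some 'assertion' line strictly precedes every 'instrumented' line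
theorem pvFlag_lt (ls : List String) (h : (ls.foldl pvStep (none, none, false)).2.2 = true) :
    ls.findIdx pvMA < ls.findIdx pvMI := by
  induction ls with
  | nil => simp [pvStep] at h
  | cons l ls ih =>
      by_cases hI : pvMI l
      · rw [List.foldl_cons, pvFlag_of_some ls _ (by simp [pvStep, hI])] at h
        simp [pvStep, hI] at h
      · by_cases hA : pvMA l
        · simp [List.findIdx_cons, hI, hA]
        · rw [List.foldl_cons, show pvStep (none, none, false) l = (none, none, false) by
            simp [pvStep, hI, hA]] at h
          have := ih h
          rw [List.findIdx_cons, List.findIdx_cons]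
          simp only [hI, hA, cond_false]
          omega

-- ===== VERDICT (by name: the statement is the Claim_ definition above) =====
theorem extract_instrumentation_details_spec : Claim_equal_extract_instrumentation_details := by
  intro output _ hpre
  show extract_instrumentation_details output = extract_instrumentation_details_alt output
  unfold extract_instrumentation_details extract_instrumentation_details_alt
  set ls := PySem.Str.splitlines output with hls
  have hA : (ls.foldl (fun d line =>
      let d := if PySem.Str.isIn "instrumented" (PySem.Str.lower line)
               then d.insert "instrumentation_line" (PySem.Str.strip line) else d
      if PySem.Str.isIn "assertion" (PySem.Str.lower line)
      then d.insert "assertions_found" (PySem.Str.strip line) else d)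
      (PySem.Dict.empty : PySem.Dict String String)).items
      = pvRenderItems (ls.foldl pvStep (none, none, false)) := by
    have hE : (PySem.Dict.empty : PySem.Dict String String)
        = pvRenderD ((none, none, false) : pvSt) := rfl
    rw [hE]
    exact congrArg PySem.Dict.items
      (pvFold_render ls (none, none, false) (by simp [pvValid]))
  rw [hA]
  have h1 := pvFold_fst ls (none, none, false)
  have h2 := pvFold_snd ls (none, none, false)
  rcases hf : ls.foldl pvStep (none, none, false) with ⟨oI, oA, b⟩
  rw [hf] at h1 h2
  simp only [Option.or_none] at h1 h2
  -- B's side: fold over the two keyword pairs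
  simp only [List.foldl_cons, List.foldl_nil]
  have hBI : (ls.filter (fun l => PySem.Str.isIn "instrumented" (PySem.Str.lower l))) = ls.filter pvMI := rfl
  have hBA : (ls.filter (fun l => PySem.Str.isIn "assertion" (PySem.Str.lower l))) = ls.filter pvMA := rfl
  show pvRenderItems (oI, oA, b) = _
  rcases hgI : (ls.filter pvMI).getLast? with _ | m <;>
    rcases hgA : (ls.filter pvMA).getLast? with _ | m' <;>
    rw [List.getLast?_map, hgI] at h1 <;>
    rw [List.getLast?_map, hgA] at h2 <;>
    simp only [Option.map_none, Option.map_some] at h1 h2 <;>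
    subst h1 <;> subst h2
  · simp only [hBI, hBA, hgI, hgA]
    cases b <;> rfl
  · simp only [hBI, hBA, hgI, hgA]
    cases b <;> rfl
  · simp only [hBI, hBA, hgI, hgA]
    cases b <;> rfl
  · -- both keywords occur
    rcases hb : b with _ | _
    · simp only [hBI, hBA, hgI, hgA]
      rfl
    · -- flag raised: excluded by Pre_, since an instrumented line exists
      exfalso
      have hlt := pvFlag_lt ls (by rw [hf, hb])
      have hmemI : m ∈ ls ∧ pvMI m = true := by
        have hm := List.mem_of_getLast? hgI
        exact ⟨(List.mem_filter.mp hm).1, (List.mem_filter.mp hm).2⟩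
      unfold Pre_extract_instrumentation_details at hpre
      rw [← hls] at hpre
      have heqI : (fun l => PySem.Str.isIn "instrumented" (PySem.Str.lower l)) = pvMI := rfl
      have heqA : (fun l => PySem.Str.isIn "assertion" (PySem.Str.lower l)) = pvMA := rfl
      rw [heqI, heqA] at hpre
      rcases hpre with hle | hall
      · omega
      · have hcon := List.all_eq_true.mp hall m hmemI.1
        have hml := hmemI.2
        simp only [Bool.not_eq_eq_eq_not, Bool.not_true] at hcon
        simp only [pvMI] at hml
        rw [hml] at hcon
        exact Bool.true_eq_false.mp hcon
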